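-- pv_equiv track=rewrite | github.com/Luiz-Frias/mvp-policy-decisions-backend | scripts/quick-fix-master.py | _insert_model_after_imports
-- ===== SOURCE A (Python) =====
-- def _insert_model_after_imports(content: str, model: str) -> str:
--     """Insert model definition after imports."""
--     lines = content.split('\n')
--
--     # Find last import line
--     last_import_line = 0
--     for i, line in enumerate(lines):
--         if line.strip().startswith(('import ', 'from ')):
--             last_import_line = i
--
--     # Insert model after last import
--     lines.insert(last_import_line + 1, model)
--     return '\n'.join(lines)
-- ===== SOURCE B (Python) =====
-- def _insert_model_after_imports(content: str, model: str) -> str: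
--     """Insert model definition after imports.
--
--     Streaming rebuild: one pass that flushes a pending buffer into the output
--     at every import line, so the output segments are built directly with no
--     index arithmetic and no list.insert.
--     """
--     lines = content.split('\n')
--     emitted = []   # lines up to and including the last import seen so far
--     pending = []   # lines after the last import seen so far
--     for line in lines:
--         pending.append(line)
--         if line.strip().startswith(('import ', 'from ')):
--             emitted.extend(pending)
--             pending = []
--     if emitted:
--         return '\n'.join(emitted + [model] + pending)
--     # no import line at all: keep A's convention of inserting after line 0
--     return '\n'.join(lines[:1] + [model] + lines[1:])
-- ===== Notes on version B (the rewrite author's own statement) =====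
-- stated objective: alternative
-- what changed: Replaces A's find-the-last-import-index-then-list.insert with a streaming rebuild: one pass that flushes a pending buffer into the output at each import line, so the result segments are constructed directly without index arithmetic or insert.
import Mathlib
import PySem

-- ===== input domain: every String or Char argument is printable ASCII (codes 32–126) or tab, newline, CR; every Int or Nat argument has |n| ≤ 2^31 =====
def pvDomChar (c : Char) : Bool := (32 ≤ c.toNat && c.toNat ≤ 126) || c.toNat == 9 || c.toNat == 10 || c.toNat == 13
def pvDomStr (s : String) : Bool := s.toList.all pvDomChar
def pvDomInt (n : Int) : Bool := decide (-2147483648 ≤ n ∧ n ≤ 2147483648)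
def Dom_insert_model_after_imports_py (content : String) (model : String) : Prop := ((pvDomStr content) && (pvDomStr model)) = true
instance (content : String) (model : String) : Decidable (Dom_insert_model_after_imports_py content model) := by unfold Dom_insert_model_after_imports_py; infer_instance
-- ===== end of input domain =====

-- B replaces A's find-the-last-import-index-then-insert with a streaming rebuild:
-- one pass flushing a pending buffer into the output at each import line (alternative, same cost).

-- ===== PORT A =====
-- line.strip().startswith(('import ', 'from '))
def pvIsImp (line : String) : Bool :=
  PySem.Str.startswith (PySem.Str.strip line) "import " ||
  PySem.Str.startswith (PySem.Str.strip line) "from "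

def insert_model_after_imports_py (content : String) (model : String) : String :=
  let lines := (PySem.Str.split? content "\n").getD []
  let last_import_line :=
    (PySem.List.enumerate lines 0).foldl
      (fun acc p => if pvIsImp p.2 then p.1 else acc) (0 : Int)
  PySem.Str.join "\n" (PySem.List.insert lines (last_import_line + 1) model)

-- ===== PORT B =====
-- the for-loop of Source B: state (emitted, pending); append, flush on import
def pvFlushStep (st : List String × List String) (line : String) : List String × List String :=
  let p := st.2 ++ [line]
  if pvIsImp line then (st.1 ++ p, []) else (st.1, p)

def insert_model_after_imports_py_alt (content : String) (model : String) : String :=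
  let lines := (PySem.Str.split? content "\n").getD []
  let st := lines.foldl pvFlushStep ([], [])
  if st.1 ≠ [] then
    PySem.Str.join "\n" (st.1 ++ [model] ++ st.2)
  else
    PySem.Str.join "\n" (lines.take 1 ++ [model] ++ lines.drop 1)

-- ===== PRECONDITION & SPEC =====
def Spec_insert_model_after_imports_py (content : String) (model : String) (out : String) : Prop := out = insert_model_after_imports_py_alt content model
instance (content : String) (model : String) (out : String) : Decidable (Spec_insert_model_after_imports_py content model out) := by unfold Spec_insert_model_after_imports_py; infer_instance

-- ===== CLAIM (what is proved, stated in full; the proofs are below) =====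
def Claim_equal_insert_model_after_imports_py : Prop := ∀ (content : String) (model : String), Dom_insert_model_after_imports_py content model → Spec_insert_model_after_imports_py content model (insert_model_after_imports_py content model)

-- ===== LEMMAS AND PROOFS =====

-- last index (from the front) of an import line, as a structural recursion
def pvLastImp : List String → Option Nat
  | [] => none
  | l :: rest =>
    match pvLastImp rest with
    | some k => some (k + 1)
    | none => if pvIsImp l then some 0 else none

theorem pvLastImp_lt_length (xs : List String) (k : Nat) (h : pvLastImp xs = some k) :
    k < xs.length := by
  induction xs generalizing k with
  | nil => simp [pvLastImp] at h
  | cons l rest ih =>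
    simp only [pvLastImp] at h
    cases hr : pvLastImp rest with
    | some j =>
      rw [hr] at h
      simp only [Option.some.injEq] at h
      subst h
      simpa using Nat.succ_lt_succ (ih j hr)
    | none =>
      rw [hr] at h
      by_cases hi : pvIsImp l
      · simp only [hi, if_true, Option.some.injEq] at h
        subst h
        simp
      · simp [hi] at h

-- A's enumerate-foldl computes the last import index (offset n), or keeps the accumulator
theorem foldl_last_eq_lastImp (xs : List String) (n : Int) (a : Int) :
    (PySem.List.enumerate xs n).foldl
        (fun acc p => if pvIsImp p.2 then p.1 else acc) a =
      match pvLastImp xs with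
      | some k => n + k
      | none => a := by
  induction xs generalizing n a with
  | nil => simp [pvLastImp]
  | cons l rest ih =>
    rw [PySem.List.enumerate_cons]
    simp only [List.foldl_cons, pvLastImp]
    rw [ih]
    cases hr : pvLastImp rest with
    | some k =>
      by_cases hi : pvIsImp l <;> simp only [hi, if_true, if_false, Bool.false_eq_true] <;>
        push_cast <;> ring
    | none =>
      by_cases hi : pvIsImp l <;> simp [hi]

-- B's fold computes the segments (take/drop at the last import index)
theorem foldl_flush_eq (xs : List String) (e p : List String) :
    xs.foldl pvFlushStep (e, p) =
      match pvLastImp xs with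
      | some k => (e ++ p ++ xs.take (k + 1), xs.drop (k + 1))
      | none => (e, p ++ xs) := by
  induction xs generalizing e p with
  | nil => simp [pvLastImp]
  | cons l rest ih =>
    simp only [List.foldl_cons, pvLastImp, pvFlushStep]
    by_cases hi : pvIsImp l
    · simp only [hi, if_true]
      rw [ih]
      cases hr : pvLastImp rest with
      | some k => simp [List.take_succ_cons, List.drop_succ_cons]
      | none => simp
    · simp only [hi, if_false, Bool.false_eq_true]
      rw [ih]
      cases hr : pvLastImp rest with
      | some k => simp [List.take_succ_cons, List.drop_succ_cons]
      | none => simp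

-- ===== VERDICT (by name: the statement is the Claim_ definition above) =====
theorem insert_model_after_imports_py_spec : Claim_equal_insert_model_after_imports_py := by
  intro content model _
  unfold Spec_insert_model_after_imports_py insert_model_after_imports_py
    insert_model_after_imports_py_alt
  set lines := (PySem.Str.split? content "\n").getD [] with hlines
  simp only [foldl_last_eq_lastImp, foldl_flush_eq]
  cases hk : pvLastImp lines with
  | some k =>
    have hk' : k < lines.length := pvLastImp_lt_length lines k hk
    have hne : lines ≠ [] := by
      intro h; rw [h] at hk'; simp at hk'
    have hins : PySem.List.insert lines ((k : Int) + 1) model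
        = lines.take (k + 1) ++ model :: lines.drop (k + 1) := by
      have h1 := PySem.List.insert_natCast lines (k + 1) model hk'
      have h2 : ((k : Int) + 1) = ((k + 1 : Nat) : Int) := by push_cast; ring
      rw [h2, h1]
    simp [hins, hne]
  | none =>
    have hins : PySem.List.insert lines (1 : Int) model
        = lines.take 1 ++ model :: lines.drop 1 := by
      cases lines with
      | nil => simp [PySem.List.insert]
      | cons a t =>
        have := PySem.List.insert_natCast (a :: t) 1 model (by simp)
        rw [← this]
        norm_num
    simp [hins]
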